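-- pv_equiv track=rewrite | github.com/i-cohen/Isaac | cs591/sg.py | atLeastHalf
-- ===== SOURCE A (Python) =====
-- def atLeastHalf(upperbound = 100):
--     sgValues ={}
--     for x in range(0,upperbound+1):
--         counter =0
--         found = False
--         while not found:
--             if pow(2,counter) > x:
--                 sgValues[x] = counter
--                 found = True
--             else:
--                 counter +=1
--     return sgValues
-- ===== SOURCE B (Python) =====
-- def atLeastHalf(upperbound=100):
--     # Sweep the output value k over doubling blocks instead of searching per x.
--     if upperbound < 0:
--         return {}
--     sgValues = {0: 0}
--     lo = 1
--     k = 1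
--     while lo <= upperbound:
--         hi = min(2 * lo, upperbound + 1)
--         for x in range(lo, hi):
--             sgValues[x] = k
--         lo *= 2
--         k += 1
--     return sgValues
-- ===== Notes on version B (the rewrite author's own statement) =====
-- stated objective: faster
-- what changed: Instead of restarting a power search from counter=0 for every x, B sweeps the answer k outward, assigning each doubling block [2^(k-1), min(2^k, upperbound+1)) the value k in one pass.
import Mathlib
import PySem

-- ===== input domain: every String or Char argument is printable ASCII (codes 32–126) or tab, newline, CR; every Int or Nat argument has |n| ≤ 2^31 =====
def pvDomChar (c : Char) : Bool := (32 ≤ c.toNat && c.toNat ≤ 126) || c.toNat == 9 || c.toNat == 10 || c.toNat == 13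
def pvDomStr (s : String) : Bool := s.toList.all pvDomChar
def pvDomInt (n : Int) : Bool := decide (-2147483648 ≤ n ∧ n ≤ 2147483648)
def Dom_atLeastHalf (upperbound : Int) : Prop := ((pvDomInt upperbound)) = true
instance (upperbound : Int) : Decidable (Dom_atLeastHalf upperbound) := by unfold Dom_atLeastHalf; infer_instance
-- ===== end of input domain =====

-- B replaces A's per-x search for the smallest counter with 2^counter > x by a single
-- outward sweep over doubling blocks, assigning each block its value k at once (faster).

-- ===== PORT A =====
-- A's inner `while not found` loop: increment counter until 2^counter > x.
-- Fuel recursion: for x ≥ 0 (the only x the outer range produces), x.toNat + 1 steps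
-- always suffice (proved in the lemmas below), so the fuel-0 branch is never reached.
def atLeastHalfFind (x : Int) : Nat → Nat → Int
  | 0, counter => (counter : Int)
  | fuel + 1, counter =>
      if (2 : Int) ^ counter > x then (counter : Int)
      else atLeastHalfFind x fuel (counter + 1)

def atLeastHalf (upperbound : Int) : List (Int × Int) :=
  ((PySem.List.pyRange 0 (upperbound + 1) 1).foldl
      (fun d x => d.insert x (atLeastHalfFind x (x.toNat + 1) 0))
      PySem.Dict.empty).items

-- ===== PORT B =====
-- B's while loop; the keys written are always fresh (strictly increasing), so the
-- dict assignment sg[x] = k appends (x, k). The `h` argument carries the loop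
-- invariant 1 ≤ lo needed for termination (lo doubles each round).
def atLeastHalfSweep (ub : Int) (lo k : Int) (h : 1 ≤ lo) (acc : List (Int × Int)) :
    List (Int × Int) :=
  if hle : lo ≤ ub then
    atLeastHalfSweep ub (2 * lo) (k + 1) (by omega)
      ((PySem.List.pyRange lo (min (2 * lo) (ub + 1)) 1).foldl
        (fun a x => a ++ [(x, k)]) acc)
  else acc
termination_by (ub + 1 - lo).toNat
decreasing_by omega

def atLeastHalf_alt (upperbound : Int) : List (Int × Int) :=
  if upperbound < 0 then []
  else atLeastHalfSweep upperbound 1 1 (by omega) [(0, 0)]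

-- ===== PRECONDITION & SPEC =====
def Spec_atLeastHalf (upperbound : Int) (out : List (Int × Int)) : Prop := out = atLeastHalf_alt upperbound
instance (upperbound : Int) (out : List (Int × Int)) : Decidable (Spec_atLeastHalf upperbound out) := by unfold Spec_atLeastHalf; infer_instance

-- ===== CLAIM (what is proved, stated in full; the proofs are below) =====
def Claim_equal_atLeastHalf : Prop := ∀ (upperbound : Int), Dom_atLeastHalf upperbound → Spec_atLeastHalf upperbound (atLeastHalf upperbound)

-- ===== LEMMAS AND PROOFS =====

-- Both sides compute x ↦ x.toNat.size (the least k with x < 2^k), listed for x = 0..ub.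
def pvTarget (ub : Int) : List (Int × Int) :=
  (PySem.List.pyRange 0 (ub + 1) 1).map (fun x => (x, (x.toNat.size : Int)))

lemma find_eq_size (n fuel c : Nat) (hc : c ≤ n.size) (hf : n.size < fuel + c) :
    atLeastHalfFind (n : Int) fuel c = (n.size : Int) := by
  induction fuel generalizing c with
  | zero => omega
  | succ fuel ih =>
    simp only [atLeastHalfFind]
    by_cases hgt : (2 : Int) ^ c > (n : Int)
    · have hlt : n < 2 ^ c := by exact_mod_cast hgt
      rw [if_pos hgt]
      exact_mod_cast Nat.le_antisymm hc (Nat.size_le.mpr hlt)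
    · have hge : ¬ n < 2 ^ c := by
        intro h; exact hgt (by exact_mod_cast h)
      have hcs : c < n.size := by
        by_contra h
        exact hge (Nat.size_le.mp (by omega))
      rw [if_neg hgt]
      exact ih (c + 1) (by omega) (by omega)

lemma size_eq_of_block (j : Nat) (n : Nat) (h1 : 2 ^ j ≤ n) (h2 : n < 2 ^ (j + 1)) :
    n.size = j + 1 := by
  have hle : n.size ≤ j + 1 := Nat.size_le.mpr h2
  have hlt : j < n.size := Nat.lt_size.mpr h1
  omega

lemma sweep_congr (ub lo lo' k : Int) (hll : lo = lo') (p : 1 ≤ lo)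
    (acc : List (Int × Int)) :
    atLeastHalfSweep ub lo k p acc = atLeastHalfSweep ub lo' k (hll ▸ p) acc := by
  subst hll; rfl

lemma sweep_eq_aux (ub : Int) (m : Nat) :
    ∀ (j : Nat) (k : Int), (ub + 1 - (2:Int) ^ j).toNat ≤ m → k = (j : Int) + 1 →
    ∀ (h : 1 ≤ (2:Int) ^ j) (acc : List (Int × Int)),
    atLeastHalfSweep ub ((2:Int) ^ j) k h acc
      = acc ++ (PySem.List.pyRange ((2:Int) ^ j) (ub + 1) 1).map
          (fun x => (x, (x.toNat.size : Int))) := by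
  induction m with
  | zero =>
    intro j k hm hk h acc
    have hnle : ¬ ((2:Int) ^ j ≤ ub) := by omega
    rw [atLeastHalfSweep, dif_neg hnle, PySem.List.pyRange_one_eq_nil (by omega)]
    simp
  | succ m ih =>
    intro j k hm hk h acc
    have h2j : (2:Int) ^ (j + 1) = 2 * 2 ^ j := by ring
    by_cases hle : (2:Int) ^ j ≤ ub
    · rw [atLeastHalfSweep, dif_pos hle, PySem.List.foldl_append_singleton_eq_map,
        sweep_congr ub (2 * (2:Int) ^ j) ((2:Int) ^ (j + 1)) (k + 1) h2j.symm _ _]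
      refine (ih (j + 1) (k + 1) (by omega) (by push_cast; omega) _ _).trans ?_
      rw [List.append_assoc]
      congr 1
      have hblock : (PySem.List.pyRange ((2:Int)^j) (min (2 * 2^j) (ub + 1)) 1).map
          (fun x => (x, k))
          = (PySem.List.pyRange ((2:Int)^j) (min (2 * 2^j) (ub + 1)) 1).map
              (fun x => (x, (x.toNat.size : Int))) := by
        apply List.map_congr_left
        intro x hx
        rw [PySem.List.mem_pyRange_one] at hx
        have hc1 : ((2 ^ j : Nat) : Int) = (2:Int) ^ j := by push_cast; ring
        have hc2 : ((2 ^ (j+1) : Nat) : Int) = (2:Int) ^ (j + 1) := by push_cast; ring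
        have hxn1 : 2 ^ j ≤ x.toNat := by omega
        have hxn2 : x.toNat < 2 ^ (j + 1) := by omega
        rw [size_eq_of_block j x.toNat hxn1 hxn2, hk]
        push_cast; ring_nf
      rw [hblock, ← List.map_append]
      congr 1
      by_cases hsmall : 2 * (2:Int) ^ j ≤ ub + 1
      · rw [min_eq_left hsmall, ← h2j,
          ← PySem.List.pyRange_one_append ((2:Int)^j) ((2:Int)^(j+1)) (ub+1)
            (by omega) (by omega)]
      · rw [min_eq_right (by omega),
          PySem.List.pyRange_one_eq_nil (show ub + 1 ≤ (2:Int)^(j+1) from by omega)]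
        simp
    · rw [atLeastHalfSweep, dif_neg hle, PySem.List.pyRange_one_eq_nil (by omega)]
      simp

lemma portA_eq_target (ub : Int) : atLeastHalf ub = pvTarget ub := by
  unfold atLeastHalf pvTarget
  have h := PySem.Dict.items_foldl_insert_fresh
      (PySem.List.pyRange 0 (ub + 1) 1) (fun x => x)
      (fun x => atLeastHalfFind x (x.toNat + 1) 0) PySem.Dict.empty
      (by intro a _; exact PySem.Dict.contains_empty a)
      (by simpa using PySem.List.nodup_pyRange_one 0 (ub + 1))
  refine Eq.trans (b := [] ++ (PySem.List.pyRange 0 (ub + 1) 1).map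
      (fun a => (a, atLeastHalfFind a (a.toNat + 1) 0))) h ?_
  rw [List.nil_append]
  apply List.map_congr_left
  intro x hx
  rw [PySem.List.mem_pyRange_one] at hx
  have hsize : x.toNat.size ≤ x.toNat := Nat.size_le.mpr Nat.lt_two_pow_self
  have hfind := find_eq_size x.toNat (x.toNat + 1) 0 (by omega) (by omega)
  rw [show ((x.toNat : Int)) = x from by omega] at hfind
  rw [hfind]

lemma portB_eq_target (ub : Int) : atLeastHalf_alt ub = pvTarget ub := by
  unfold atLeastHalf_alt pvTarget
  by_cases hneg : ub < 0
  · rw [if_pos hneg, PySem.List.pyRange_one_eq_nil (by omega)]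
    simp
  · rw [if_neg hneg, sweep_congr ub 1 ((2:Int) ^ 0) 1 (by norm_num) _ _]
    refine (sweep_eq_aux ub (ub + 1 - 1).toNat 0 1 (by norm_num) (by norm_num)
      _ [(0, 0)]).trans ?_
    rw [PySem.List.pyRange_one_cons (show (0:Int) < ub + 1 from by omega)]
    simp [Nat.size_zero]

-- ===== VERDICT (by name: the statement is the Claim_ definition above) =====
theorem atLeastHalf_spec : Claim_equal_atLeastHalf := by
  intro ub _
  unfold Spec_atLeastHalf
  rw [portA_eq_target, portB_eq_target]
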